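-- pv_equiv track=rewrite | github.com/simonbrahan/aoc2021 | 11/part1.py | maybe_flash
-- ===== SOURCE A (Python) =====
-- def get_neighbours(x, y, squids):
--     directions = [(-1, -1), (-1, 0), (-1, 1), (0, -1), (0, 1), (1, -1), (1, 0), (1, 1)]
--
--     out = []
--     for add_x, add_y in directions:
--         neighbour_x = x + add_x
--         neighbour_y = y + add_y
--
--         if 0 <= neighbour_y < len(squids) and 0 <= neighbour_x < len(squids[neighbour_y]):
--             out.append((neighbour_x, neighbour_y))
--
--     return out
--
-- def maybe_flash(x, y, squids, flashed_squids):
--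
--     if squids[y][x] <= 9 or (x, y) in flashed_squids:
--         return squids, flashed_squids
--
--     flashed_squids.add((x, y))
--
--     neighbours = get_neighbours(x, y, squids)
--
--     for neighbour_x, neighbour_y in neighbours:
--         squids[neighbour_y][neighbour_x] += 1
--         squids, flashed_squids = maybe_flash(neighbour_x, neighbour_y, squids, flashed_squids)
--
--     return squids, flashed_squids
-- ===== SOURCE B (Python) =====
-- def get_neighbours(x, y, squids):
--     directions = [(-1, -1), (-1, 0), (-1, 1), (0, -1), (0, 1), (1, -1), (1, 0), (1, 1)]
--
--     out = []
--     for add_x, add_y in directions: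
--         neighbour_x = x + add_x
--         neighbour_y = y + add_y
--
--         if 0 <= neighbour_y < len(squids) and 0 <= neighbour_x < len(squids[neighbour_y]):
--             out.append((neighbour_x, neighbour_y))
--
--     return out
--
-- def maybe_flash(x, y, squids, flashed_squids):
--     # explicit work-stack instead of recursion; mutates squids / flashed_squids like A
--     if squids[y][x] <= 9 or (x, y) in flashed_squids:
--         return squids, flashed_squids
--
--     flashed_squids.add((x, y))
--     stack = list(reversed(get_neighbours(x, y, squids)))
--
--     while stack:
--         nx, ny = stack.pop()
--         squids[ny][nx] += 1
--         if squids[ny][nx] > 9 and (nx, ny) not in flashed_squids: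
--             flashed_squids.add((nx, ny))
--             stack.extend(reversed(get_neighbours(nx, ny, squids)))
--
--     return squids, flashed_squids
-- ===== Notes on version B (the rewrite author's own statement) =====
-- stated objective: alternative
-- what changed: A's recursive flood (maybe_flash recursing on each incremented neighbour) is replaced by an iterative explicit work-stack loop that pops a cell, increments it, and on a flash pushes its neighbours, visiting cells in the same depth-first order.
import Mathlib
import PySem

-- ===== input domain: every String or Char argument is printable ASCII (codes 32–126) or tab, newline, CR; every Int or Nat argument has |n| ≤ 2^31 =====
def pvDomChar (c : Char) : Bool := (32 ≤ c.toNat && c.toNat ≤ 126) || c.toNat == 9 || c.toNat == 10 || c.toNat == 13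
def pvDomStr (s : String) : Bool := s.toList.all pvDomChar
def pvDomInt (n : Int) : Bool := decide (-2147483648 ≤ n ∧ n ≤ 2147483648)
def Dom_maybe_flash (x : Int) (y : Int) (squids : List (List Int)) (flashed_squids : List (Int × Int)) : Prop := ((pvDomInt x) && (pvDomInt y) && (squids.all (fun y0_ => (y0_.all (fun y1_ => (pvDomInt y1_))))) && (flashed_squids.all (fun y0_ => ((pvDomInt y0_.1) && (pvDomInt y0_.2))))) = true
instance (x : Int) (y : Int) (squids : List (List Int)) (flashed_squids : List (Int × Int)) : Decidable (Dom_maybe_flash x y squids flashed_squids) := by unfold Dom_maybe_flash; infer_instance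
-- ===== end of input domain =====

-- B replaces A's recursion by an explicit work-stack loop visiting cells in the same
-- depth-first order (objective: alternative decomposition; both Pythons mutate
-- squids/flashed_squids in place identically; the equivalence proved is about the return value).

-- ===== PORT A =====

-- shared helper (identical source code in Source A and Source B)
def get_neighbours (x : Int) (y : Int) (squids : List (List Int)) : List (Int × Int) :=
  ([(-1, -1), (-1, 0), (-1, 1), (0, -1), (0, 1), (1, -1), (1, 0), (1, 1)] : List (Int × Int)).foldl
    (fun out d =>
      let nx := x + d.1
      let ny := y + d.2
      if 0 ≤ ny ∧ ny < (squids.length : Int) ∧ 0 ≤ nx ∧ nx < (((squids.getD ny.toNat []).length : Int)) then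
        out ++ [(nx, ny)]
      else out) []

-- squids[y][x]: two Python index operations (none = IndexError)
def pyGet2 (squids : List (List Int)) (y : Int) (x : Int) : Option Int :=
  (PySem.List.pyGet? squids y).bind (fun row => PySem.List.pyGet? row x)

-- squids[ny][nx] += 1; both Pythons only apply it to get_neighbours output, whose
-- coordinates are nonnegative and in range, where .toNat indexing is exact
def bump (squids : List (List Int)) (n : Int × Int) : List (List Int) :=
  squids.modify n.2.toNat (fun row => row.modify n.1.toNat (· + 1))

-- fuel bookkeeping (totality only): every cell Python indexing can reach (incl. negative wrap)
def colCells (L : Nat) (yv : Int) : List (Int × Int) :=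
  (List.range (2 * L)).map (fun (j : Nat) => ((j : Int) - (L : Int), yv))

def cellsSh (sh : List Nat) : List (Int × Int) :=
  (List.range sh.length).flatMap
    (fun i => colCells (sh.getD i 0) (i : Int) ++ colCells (sh.getD i 0) ((i : Int) - (sh.length : Int)))

def cellsW (squids : List (List Int)) : List (Int × Int) :=
  cellsSh (squids.map List.length)

-- number of reachable cells not yet flashed: an upper bound on the flashes still possible
def U (squids : List (List Int)) (f : List (Int × Int)) : Nat :=
  (cellsW squids).countP (fun c => !(decide (c ∈ f)))

theorem shape_bump (s : List (List Int)) (n : Int × Int) :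
    (bump s n).map List.length = s.map List.length := by
  unfold bump
  induction s generalizing n with
  | nil => simp
  | cons a l ih =>
    cases hy : n.2.toNat with
    | zero => simp
    | succ k =>
      have := ih (n.1, (k : Int))
      simp at this ⊢
      simpa using this

theorem cellsW_bump (s : List (List Int)) (n : Int × Int) : cellsW (bump s n) = cellsW s := by
  unfold cellsW; rw [shape_bump]

theorem U_bump (s : List (List Int)) (n : Int × Int) (f : List (Int × Int)) :
    U (bump s n) f = U s f := by
  unfold U; rw [cellsW_bump]

theorem mem_colCells (L : Nat) (yv : Int) (x : Int) (h1 : -(L : Int) ≤ x) (h2 : x < (L : Int)) :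
    (x, yv) ∈ colCells L yv := by
  unfold colCells
  have hj : (x + (L : Int)).toNat < 2 * L := by omega
  have hval : (((x + (L : Int)).toNat : Nat) : Int) - (L : Int) = x := by omega
  exact (List.mem_map (f := fun j : Nat => ((j : Int) - (L : Int), yv))).2
    ⟨(x + (L : Int)).toNat, List.mem_range.2 hj, by rw [hval]⟩

theorem mem_cellsW (s : List (List Int)) (y x : Int) (v : Int)
    (h : pyGet2 s y x = some v) : (x, y) ∈ cellsW s := by
  unfold pyGet2 at h
  obtain ⟨row, hrow, hx⟩ := Option.bind_eq_some_iff.1 h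
  have hyR : PySem.Raise.InRange s.length y := by
    by_contra hc
    rw [(PySem.List.pyGet?_eq_none_iff s y).2 hc] at hrow
    simp at hrow
  have hxR : PySem.Raise.InRange row.length x := by
    by_contra hc
    rw [(PySem.List.pyGet?_eq_none_iff row x).2 hc] at hx
    simp at hx
  unfold PySem.Raise.InRange at hyR hxR
  set i : Nat := (if 0 ≤ y then y else y + (s.length : Int)).toNat with hi
  have hilt : i < s.length := by
    by_cases h0 : 0 ≤ y
    · simp only [hi, if_pos h0]; omega
    · simp only [hi, if_neg h0]; omega
  have hrow_eq : row = s[i]'hilt := by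
    by_cases hy0 : 0 ≤ y
    · rw [PySem.List.pyGet?_of_nonneg s hy0] at hrow
      have hit : y.toNat = i := by simp only [hi, if_pos hy0]
      rw [hit, List.getElem?_eq_getElem hilt] at hrow
      exact (Option.some.inj hrow).symm
    · have hk : y = -((((-y).toNat : Nat) : Int)) := by omega
      rw [hk, PySem.List.pyGet?_neg_natCast s (-y).toNat (by omega) (by omega)] at hrow
      have hieq : i = (y + (s.length : Int)).toNat := by
        simp only [hi, if_neg hy0]
      have hlen : s.length - (-y).toNat = i := by omega
      rw [hlen, List.getElem?_eq_getElem hilt] at hrow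
      exact (Option.some.inj hrow).symm
  have hL : (s.map List.length).getD i 0 = row.length := by
    rw [List.getD_eq_getElem (s.map List.length) 0 (by simpa using hilt)]
    simp [hrow_eq]
  unfold cellsW cellsSh
  refine List.mem_flatMap.2 ⟨i, List.mem_range.2 (by simpa using hilt), ?_⟩
  rw [hL]
  by_cases hy0 : 0 ≤ y
  · have hyi : (i : Int) = y := by
      have : i = y.toNat := by simp only [hi, if_pos hy0]
      omega
    refine List.mem_append.2 (Or.inl ?_)
    rw [← hyi]
    exact mem_colCells row.length (i : Int) x (by omega) (by omega)
  · have hyi : (i : Int) - ((s.map List.length).length : Int) = y := by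
      have : i = (y + (s.length : Int)).toNat := by simp only [hi, if_neg hy0]
      simp only [List.length_map]
      omega
    refine List.mem_append.2 (Or.inr ?_)
    rw [← hyi]
    exact mem_colCells row.length _ x (by omega) (by omega)

theorem countP_lt_of_mem {α : Type} {p q : α → Bool} {l : List α} {c : α}
    (hc : c ∈ l) (hpc : p c = true) (hqc : q c = false)
    (himp : ∀ a, q a = true → p a = true) : l.countP q < l.countP p := by
  obtain ⟨l1, l2, rfl⟩ := List.append_of_mem hc
  have h1 : l1.countP q ≤ l1.countP p := List.countP_mono_left (fun a _ => himp a)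
  have h2 : l2.countP q ≤ l2.countP p := List.countP_mono_left (fun a _ => himp a)
  simp [List.countP_append, hpc, hqc]
  omega

theorem U_add_lt (s : List (List Int)) (f : List (Int × Int)) (c : Int × Int)
    (hc : c ∈ cellsW s) (hf : c ∉ f) : U s (PySem.Set.add f c) < U s f := by
  unfold U
  refine countP_lt_of_mem hc (by simpa using hf) ?_ ?_
  · simp [PySem.Set.mem_add]
  · intro a ha
    simp only [Bool.not_eq_eq_eq_not, Bool.not_true, decide_eq_false_iff_not] at ha ⊢
    intro hmem
    exact ha ((PySem.Set.mem_add f c a).2 (Or.inl hmem))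

-- A's neighbour for-loop: "increment the neighbour, then recurse"; the recursive
-- call (A's maybe_flash at one fuel less) is passed in as `step`
def loopGo (step : Int → Int → List (List Int) → List (Int × Int) → List (List Int) × List (Int × Int)) :
    List (Int × Int) → List (List Int) → List (Int × Int) → List (List Int) × List (Int × Int)
  | [], s, f => (s, f)
  | n :: ns, s, f =>
    loopGo step ns (step n.1 n.2 (bump s n) f).1 (step n.1 n.2 (bump s n) f).2

-- A's recursion, with a fuel guard for totality only: the entry point passes
-- U squids flashed + 1 fuel and lemma P1_all below shows it is never exhausted
def flashF : Nat → Int → Int → List (List Int) → List (Int × Int) → List (List Int) × List (Int × Int)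
  | 0, _, _, s, f => (s, f)
  | (k + 1), x, y, s, f =>
    match pyGet2 s y x with
    | none => (s, f)            -- Python raises IndexError here (outside Pre_)
    | some v =>
      if v ≤ 9 ∨ (x, y) ∈ f then (s, f)
      else loopGo (flashF k) (get_neighbours x y s) s (PySem.Set.add f (x, y))

def maybe_flash (x : Int) (y : Int) (squids : List (List Int)) (flashed_squids : List (Int × Int)) : List (List Int) × (List (Int × Int)) :=
  flashF (U squids flashed_squids + 1) x y squids flashed_squids

-- ===== PORT B =====

theorem dec_skip (s : List (List Int)) (f : List (Int × Int)) (n : Int × Int) (rest : List (Int × Int)) :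
    Prod.Lex (· < ·) (· < ·) (U (bump s n) f, rest.length) (U s f, (n :: rest).length) := by
  rw [U_bump]
  exact Prod.Lex.right _ (by simp only [List.length_cons]; omega)

theorem dec_flash (s : List (List Int)) (f : List (Int × Int)) (n : Int × Int) (rest : List (Int × Int))
    (v : Int) (h : pyGet2 (bump s n) n.2 n.1 = some v) (hv : 9 < v ∧ n ∉ f) :
    Prod.Lex (· < ·) (· < ·) (U (bump s n) (PySem.Set.add f n), (get_neighbours n.1 n.2 (bump s n) ++ rest).length)
      (U s f, (n :: rest).length) := by
  have hmem : (n.1, n.2) ∈ cellsW (bump s n) := mem_cellsW _ _ _ _ h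
  rw [Prod.mk.eta, cellsW_bump] at hmem
  exact Prod.Lex.left _ _ (by rw [U_bump]; exact U_add_lt s f n hmem hv.2)

-- the explicit work stack (list head = stack top; Source B pushes neighbour lists reversed
-- and pops from the end, so popping visits each list front to back = prepending it here)
def stackLoop (s : List (List Int)) (f : List (Int × Int)) (stack : List (Int × Int)) : List (List Int) × List (Int × Int) :=
  match stack with
  | [] => (s, f)
  | n :: rest =>
    match h : pyGet2 (bump s n) n.2 n.1 with
    | none => stackLoop (bump s n) f rest    -- unreachable for stacked neighbours; totality only
    | some v =>
      if hv : 9 < v ∧ n ∉ f then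
        stackLoop (bump s n) (PySem.Set.add f n) (get_neighbours n.1 n.2 (bump s n) ++ rest)
      else stackLoop (bump s n) f rest
termination_by (U s f, stack.length)
decreasing_by
  · exact dec_skip s f n rest
  · exact dec_flash s f n rest v h hv
  · exact dec_skip s f n rest

def maybe_flash_alt (x : Int) (y : Int) (squids : List (List Int)) (flashed_squids : List (Int × Int)) : List (List Int) × (List (Int × Int)) :=
  match pyGet2 squids y x with
  | none => (squids, flashed_squids)    -- Python raises IndexError here (outside Pre_)
  | some v =>
    if v ≤ 9 ∨ (x, y) ∈ flashed_squids then (squids, flashed_squids)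
    else stackLoop squids (PySem.Set.add flashed_squids (x, y)) (get_neighbours x y squids)

-- ===== PRECONDITION & SPEC =====

-- Pre_ excludes exactly the inputs where the Python entry guard squids[y][x] raises
-- IndexError (y, or x in the selected row, out of range even after Python's negative wrap).
def Pre_maybe_flash (x : Int) (y : Int) (squids : List (List Int)) (flashed_squids : List (Int × Int)) : Prop :=
  -(squids.length : Int) ≤ y ∧ y < (squids.length : Int) ∧
  -(((squids.getD (if 0 ≤ y then y else y + (squids.length : Int)).toNat []).length : Int)) ≤ x ∧
  x < (((squids.getD (if 0 ≤ y then y else y + (squids.length : Int)).toNat []).length : Int))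
instance (x : Int) (y : Int) (squids : List (List Int)) (flashed_squids : List (Int × Int)) : Decidable (Pre_maybe_flash x y squids flashed_squids) := by unfold Pre_maybe_flash; infer_instance

def pvWitness_maybe_flash : Int × Int × List (List Int) × (List (Int × Int)) := (0, 0, [[9, 9], [9, 9]], [])

def Spec_maybe_flash (x : Int) (y : Int) (squids : List (List Int)) (flashed_squids : List (Int × Int)) (out : List (List Int) × (List (Int × Int))) : Prop := out = maybe_flash_alt x y squids flashed_squids
instance (x : Int) (y : Int) (squids : List (List Int)) (flashed_squids : List (Int × Int)) (out : List (List Int) × (List (Int × Int))) : Decidable (Spec_maybe_flash x y squids flashed_squids out) := by unfold Spec_maybe_flash; infer_instance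

-- ===== CLAIM (what is proved, stated in full; the proofs are below) =====
def Claim_equal_maybe_flash : Prop := ∀ (x : Int) (y : Int) (squids : List (List Int)) (flashed_squids : List (Int × Int)), Dom_maybe_flash x y squids flashed_squids → Pre_maybe_flash x y squids flashed_squids → Spec_maybe_flash x y squids flashed_squids (maybe_flash x y squids flashed_squids)

-- ===== LEMMAS AND PROOFS =====

theorem U_mono (s : List (List Int)) (f f' : List (Int × Int))
    (h : ∀ a ∈ f, a ∈ f') : U s f' ≤ U s f := by
  unfold U
  refine List.countP_mono_left (fun a _ ha => ?_)
  simp only [Bool.not_eq_eq_eq_not, Bool.not_true, decide_eq_false_iff_not] at ha ⊢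
  exact fun hm => ha (h a hm)

theorem U_congr (s s' : List (List Int)) (f : List (Int × Int))
    (h : s.map List.length = s'.map List.length) : U s f = U s' f := by
  unfold U cellsW; rw [h]

-- equation lemmas in usable form
theorem flashF_none (k : Nat) (x y : Int) (s : List (List Int)) (f : List (Int × Int))
    (h : pyGet2 s y x = none) : flashF (k + 1) x y s f = (s, f) := by
  rw [flashF, h]

theorem flashF_skip (k : Nat) (x y : Int) (s : List (List Int)) (f : List (Int × Int)) (v : Int)
    (h : pyGet2 s y x = some v) (hg : v ≤ 9 ∨ (x, y) ∈ f) : flashF (k + 1) x y s f = (s, f) := by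
  rw [flashF, h]
  exact if_pos hg

theorem flashF_flash (k : Nat) (x y : Int) (s : List (List Int)) (f : List (Int × Int)) (v : Int)
    (h : pyGet2 s y x = some v) (hg : ¬ (v ≤ 9 ∨ (x, y) ∈ f)) :
    flashF (k + 1) x y s f = loopGo (flashF k) (get_neighbours x y s) s (PySem.Set.add f (x, y)) := by
  rw [flashF, h]
  exact if_neg hg

theorem stackLoop_nil (s : List (List Int)) (f : List (Int × Int)) : stackLoop s f [] = (s, f) := by
  rw [stackLoop]

theorem loopGo_cons (step : Int → Int → List (List Int) → List (Int × Int) → List (List Int) × List (Int × Int))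
    (n : Int × Int) (ns : List (Int × Int)) (s : List (List Int)) (f : List (Int × Int)) :
    loopGo step (n :: ns) s f = loopGo step ns (step n.1 n.2 (bump s n) f).1 (step n.1 n.2 (bump s n) f).2 := rfl

-- the guarded "flash (x,y), then keep draining rest" step on B's side
def flashStep (x y : Int) (s : List (List Int)) (f : List (Int × Int)) (rest : List (Int × Int)) : List (List Int) × List (Int × Int) :=
  match pyGet2 s y x with
  | none => stackLoop s f rest
  | some v =>
    if v ≤ 9 ∨ (x, y) ∈ f then stackLoop s f rest
    else stackLoop s (PySem.Set.add f (x, y)) (get_neighbours x y s ++ rest)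

theorem stackLoop_cons (s : List (List Int)) (f : List (Int × Int)) (n : Int × Int) (rest : List (Int × Int)) :
    stackLoop s f (n :: rest) = flashStep n.1 n.2 (bump s n) f rest := by
  rw [stackLoop]
  split
  · rename_i h
    unfold flashStep
    rw [h]
  · rename_i v h
    unfold flashStep
    rw [h]
    show (if hv : 9 < v ∧ n ∉ f then
            stackLoop (bump s n) (PySem.Set.add f n) (get_neighbours n.1 n.2 (bump s n) ++ rest)
          else stackLoop (bump s n) f rest) =
        (if v ≤ 9 ∨ (n.1, n.2) ∈ f then stackLoop (bump s n) f rest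
         else stackLoop (bump s n) (PySem.Set.add f (n.1, n.2)) (get_neighbours n.1 n.2 (bump s n) ++ rest))
    by_cases hg : v ≤ 9 ∨ (n.1, n.2) ∈ f
    · have hng : ¬ (9 < v ∧ n ∉ f) := by
        rcases hg with h9 | hm
        · exact fun hc => absurd h9 (by omega)
        · exact fun hc => hc.2 (by simpa using hm)
      rw [if_pos hg, dif_neg hng]
    · rw [not_or] at hg
      rw [if_neg (not_or.2 hg), dif_pos ⟨by omega, by simpa using hg.2⟩, Prod.mk.eta]

-- statement packages for the fuel induction: A's flash / neighbour loop started with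
-- fuel ≥ unflashed cells + 1 only grows flashed_squids, preserves the grid shape,
-- and equals B's draining of the corresponding stack
def P1 (k : Nat) : Prop := ∀ x y s f, U s f + 1 ≤ k →
  (∀ a ∈ f, a ∈ (flashF k x y s f).2) ∧
  ((flashF k x y s f).1.map List.length = s.map List.length) ∧
  ∀ rest, flashStep x y s f rest = stackLoop (flashF k x y s f).1 (flashF k x y s f).2 rest

def P2 (k : Nat) : Prop := ∀ ns s f rest, U s f + 1 ≤ k →
  (∀ a ∈ f, a ∈ (loopGo (flashF k) ns s f).2) ∧
  ((loopGo (flashF k) ns s f).1.map List.length = s.map List.length) ∧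
  stackLoop s f (ns ++ rest) = stackLoop (loopGo (flashF k) ns s f).1 (loopGo (flashF k) ns s f).2 rest

theorem P2_of_P1 (k : Nat) (h1 : P1 k) : P2 k := by
  intro ns
  induction ns with
  | nil =>
    intro s f rest hk
    exact ⟨fun a ha => ha, rfl, rfl⟩
  | cons n ns ih =>
    intro s f rest hk
    rw [loopGo_cons]
    have hk1 : U (bump s n) f + 1 ≤ k := by rwa [U_bump]
    obtain ⟨hmono, hshape, heq⟩ := h1 n.1 n.2 (bump s n) f hk1
    set r := flashF k n.1 n.2 (bump s n) f with hr
    have hshape' : r.1.map List.length = s.map List.length := by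
      rw [hshape, shape_bump]
    have hk2 : U r.1 r.2 + 1 ≤ k := by
      have e1 : U r.1 r.2 = U (bump s n) r.2 := U_congr _ _ _ (by rw [hshape', shape_bump])
      have e2 : U (bump s n) r.2 ≤ U (bump s n) f := U_mono _ _ _ hmono
      omega
    obtain ⟨hmono2, hshape2, heq2⟩ := ih r.1 r.2 rest hk2
    refine ⟨fun a ha => hmono2 a (hmono a ha), by rw [hshape2, hshape'], ?_⟩
    calc stackLoop s f ((n :: ns) ++ rest)
        = flashStep n.1 n.2 (bump s n) f (ns ++ rest) := stackLoop_cons s f n (ns ++ rest)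
      _ = stackLoop r.1 r.2 (ns ++ rest) := heq (ns ++ rest)
      _ = stackLoop (loopGo (flashF k) ns r.1 r.2).1 (loopGo (flashF k) ns r.1 r.2).2 rest := heq2

theorem P1_succ (k : Nat) (h2 : P2 k) : P1 (k + 1) := by
  intro x y s f hk
  cases h : pyGet2 s y x with
  | none =>
    rw [flashF_none k x y s f h]
    refine ⟨fun a ha => ha, rfl, fun rest => ?_⟩
    unfold flashStep
    rw [h]
  | some v =>
    by_cases hg : v ≤ 9 ∨ (x, y) ∈ f
    · rw [flashF_skip k x y s f v h hg]
      refine ⟨fun a ha => ha, rfl, fun rest => ?_⟩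
      unfold flashStep
      rw [h]
      exact if_pos hg
    · rw [flashF_flash k x y s f v h hg]
      have hg' : (x, y) ∉ f := fun hm => hg (Or.inr hm)
      have hkk : U s (PySem.Set.add f (x, y)) + 1 ≤ k := by
        have := U_add_lt s f (x, y) (mem_cellsW s y x v h) hg'
        omega
      refine ⟨?_, ?_, fun rest => ?_⟩
      · intro a ha
        exact ((h2 (get_neighbours x y s) s _ [] hkk).1) a ((PySem.Set.mem_add f (x, y) a).2 (Or.inl ha))
      · exact (h2 (get_neighbours x y s) s _ [] hkk).2.1
      · have := (h2 (get_neighbours x y s) s (PySem.Set.add f (x, y)) rest hkk).2.2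
        unfold flashStep
        rw [h]
        show (if v ≤ 9 ∨ (x, y) ∈ f then stackLoop s f rest
              else stackLoop s (PySem.Set.add f (x, y)) (get_neighbours x y s ++ rest)) = _
        rw [if_neg hg]
        exact this

theorem P1_all (k : Nat) : P1 k := by
  induction k with
  | zero => intro x y s f hk; exact absurd hk (by omega)
  | succ k ih => exact P1_succ k (P2_of_P1 k ih)

-- ===== VERDICT (by name: the statement is the Claim_ definition above) =====
theorem maybe_flash_spec : Claim_equal_maybe_flash := by
  intro x y s f _ _
  unfold Spec_maybe_flash maybe_flash
  obtain ⟨_, _, heq⟩ := P1_all (U s f + 1) x y s f (le_refl _)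
  have h0 := (heq []).symm
  rw [stackLoop_nil, Prod.mk.eta] at h0
  rw [h0]
  unfold flashStep maybe_flash_alt
  cases h : pyGet2 s y x with
  | none => exact stackLoop_nil s f
  | some v =>
    show (if v ≤ 9 ∨ (x, y) ∈ f then stackLoop s f []
          else stackLoop s (PySem.Set.add f (x, y)) (get_neighbours x y s ++ [])) =
        (if v ≤ 9 ∨ (x, y) ∈ f then (s, f)
         else stackLoop s (PySem.Set.add f (x, y)) (get_neighbours x y s))
    by_cases hg : v ≤ 9 ∨ (x, y) ∈ f
    · rw [if_pos hg, if_pos hg]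
      exact stackLoop_nil s f
    · rw [if_neg hg, if_neg hg, List.append_nil]
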